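-- pv_equiv track=rewrite | github.com/TheGoldenShark/Advent-Of-Code-2019 | D4/D4.py | check
-- ===== SOURCE A (Python) =====
-- def check(arr):
--     arr=str(arr)
--     double = False
--     for i in range(0,len(arr)-1):
--         if arr[i+1]>arr[i]:
--             pass
--         elif arr[i+1]==arr[i]:
--             double=True
--         else:
--             return False
--     if double==True:
--         return True
--     else:
--         return False
-- ===== SOURCE B (Python) =====
-- def check(arr):
--     s = str(arr)
--     return list(s) == sorted(s) and any(s[i] == s[i + 1] for i in range(len(s) - 1))
-- ===== Notes on version B (the rewrite author's own statement) =====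
-- stated objective: simpler
-- what changed: Replaces the fused early-exit index loop carrying a double flag by a sort-and-compare non-decreasing test plus a separate any() adjacent-equal scan.
import Mathlib
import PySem

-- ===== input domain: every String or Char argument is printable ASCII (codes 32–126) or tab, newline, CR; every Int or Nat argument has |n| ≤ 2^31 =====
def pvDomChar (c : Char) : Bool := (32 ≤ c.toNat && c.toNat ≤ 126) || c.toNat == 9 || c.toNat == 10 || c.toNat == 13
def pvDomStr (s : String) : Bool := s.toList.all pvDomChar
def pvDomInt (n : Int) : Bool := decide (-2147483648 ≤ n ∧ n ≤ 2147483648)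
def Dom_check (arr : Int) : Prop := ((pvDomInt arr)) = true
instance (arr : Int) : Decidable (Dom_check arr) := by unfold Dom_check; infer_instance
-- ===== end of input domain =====

-- B replaces A's fused early-exit scan (with a double flag) by a sort-and-compare
-- non-decreasing test plus a separate adjacent-equal scan; objective: simpler.

-- ===== PORT A =====
-- A's for-loop over i in range(0, len-1) comparing arr[i+1] with arr[i], carrying
-- the 'double' flag and returning False early, as structural recursion over the
-- character list (arr[i], arr[i+1] are the successive adjacent pairs).
def checkLoop : List Char → Bool → Bool
  | c :: d :: rest, double =>
      if c < d then checkLoop (d :: rest) double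
      else if d == c then checkLoop (d :: rest) true
      else false
  | _, double => if double then true else false

def check (arr : Int) : Bool :=
  checkLoop (PySem.Int.toStr arr).toList false

-- ===== PORT B =====
-- any(s[i] == s[i+1] for i in range(len(s)-1)): scan of the adjacent pairs.
def hasDouble : List Char → Bool
  | c :: d :: rest => c == d || hasDouble (d :: rest)
  | _ => false

def check_alt (arr : Int) : Bool :=
  let s := (PySem.Int.toStr arr).toList
  decide (s = PySem.List.sorted s (fun c => c)) && hasDouble s

-- ===== PRECONDITION & SPEC =====
def Spec_check (arr : Int) (out : Bool) : Prop := out = check_alt arr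
instance (arr : Int) (out : Bool) : Decidable (Spec_check arr out) := by unfold Spec_check; infer_instance

-- ===== CLAIM (what is proved, stated in full; the proofs are below) =====
def Claim_equal_check : Prop := ∀ (arr : Int), Dom_check arr → Spec_check arr (check arr)

-- ===== LEMMAS AND PROOFS =====

lemma checkLoop_eq (l : List Char) (d : Bool) :
    checkLoop l d = if List.IsChain (· ≤ ·) l then (d || hasDouble l) else false := by
  induction l generalizing d with
  | nil => cases d <;> simp [checkLoop, hasDouble]
  | cons c t ih =>
    cases t with
    | nil => cases d <;> simp [checkLoop, hasDouble]
    | cons e r =>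
      simp only [List.isChain_cons_cons]
      by_cases hlt : c < e
      · have hne : (e == c) = false := by simp; exact (ne_of_gt hlt)
        have hce : (c == e) = false := by simp; exact (ne_of_lt hlt)
        simp [checkLoop, hlt, ih, le_of_lt hlt, hasDouble, hce]
      · by_cases heq : e == c
        · have hce : c = e := (beq_iff_eq.mp heq).symm
          subst hce
          simp [checkLoop, ih, hasDouble]
        · have hnle : ¬ (c ≤ e) := by
            rcases lt_trichotomy c e with h | h | h
            · exact absurd h hlt
            · exact absurd (by simp [h]) heq
            · exact not_le_of_gt h
          simp [checkLoop, hlt, heq, hnle]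

lemma isChain_iff_sorted_eq (l : List Char) :
    List.IsChain (· ≤ ·) l ↔ l = PySem.List.sorted l (fun c => c) := by
  constructor
  · intro h
    have hp : l.Pairwise (fun a b => a ≤ b) := List.isChain_iff_pairwise.mp h
    exact (PySem.List.sorted_eq_self_of_pairwise l (fun c => c) hp).symm
  · intro h
    have hp : (PySem.List.sorted l (fun c => c)).Pairwise
        (fun a b => (fun c : Char => c) a ≤ (fun c : Char => c) b) :=
      PySem.List.sorted_pairwise l (fun c => c)
    rw [← h] at hp
    exact List.Pairwise.isChain hp


lemma check_main (l : List Char) :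
    checkLoop l false = (decide (l = PySem.List.sorted l (fun c => c)) && hasDouble l) := by
  rw [checkLoop_eq]
  by_cases h : List.IsChain (· ≤ ·) l
  · rw [if_pos h, decide_eq_true ((isChain_iff_sorted_eq l).mp h)]
    simp
  · rw [if_neg h, decide_eq_false (fun hc => h ((isChain_iff_sorted_eq l).mpr hc))]
    simp

-- ===== VERDICT (by name: the statement is the Claim_ definition above) =====
theorem check_spec : Claim_equal_check := by
  intro arr _
  unfold Spec_check check check_alt
  exact check_main _
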